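-- pv_equiv track=rewrite | github.com/kasia251011/TiZPJO | lab6/main.py | replace_digits
-- ===== SOURCE A (Python) =====
-- def replace_digits(number):
--     new_number = 0
--     position = 1
--     while number > 0:
--         digit = number % 10
--         new_digit = (digit * 9 + 1) % 10
--         new_number += new_digit * position
--         position *= 10
--         number //= 10
--     return new_number
-- ===== SOURCE B (Python) =====
-- def replace_digits(number):
--     if number <= 0:
--         return 0
--     return replace_digits(number // 10) * 10 + (number % 10 * 9 + 1) % 10
-- ===== Notes on version B (the rewrite author's own statement) =====
-- stated objective: simpler
-- what changed: Replaced the while loop with its two accumulators (running sum and power-of-ten position) by a direct structural recursion on the quotient that rebuilds the result Horner-style from the transformed last digit.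
import Mathlib
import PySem

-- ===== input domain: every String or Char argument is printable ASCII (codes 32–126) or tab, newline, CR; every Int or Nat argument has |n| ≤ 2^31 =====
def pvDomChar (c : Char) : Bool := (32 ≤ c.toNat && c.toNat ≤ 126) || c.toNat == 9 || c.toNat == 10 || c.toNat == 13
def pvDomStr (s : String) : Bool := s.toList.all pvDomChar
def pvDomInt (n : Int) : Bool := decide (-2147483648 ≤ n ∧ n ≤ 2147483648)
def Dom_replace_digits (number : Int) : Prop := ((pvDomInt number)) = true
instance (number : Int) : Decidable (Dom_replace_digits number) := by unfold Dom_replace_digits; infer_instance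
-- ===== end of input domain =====

-- B replaces A's while loop (running-sum and position accumulators) by a direct
-- structural recursion on the quotient (Horner-style rebuild); objective: simpler.

-- termination measure lemma, cited by both ports' decreasing_by
theorem pv_floordiv10_toNat_lt (n : Int) (h : n > 0) :
    (PySem.Int.floordiv n 10).toNat < n.toNat := by
  have h1 : PySem.Int.floordiv n 10 = n / 10 := by
    have := Int.fdiv_eq_ediv (a := n) (b := 10)
    simp at this
    simpa [PySem.Int.floordiv] using this
  omega

-- ===== PORT A =====
-- while loop of A as a tail recursion over the same state (number, new_number, position)
def replLoopA (number new_number position : Int) : Int :=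
  if h : number > 0 then
    let digit := PySem.Int.mod number 10
    let new_digit := PySem.Int.mod (digit * 9 + 1) 10
    replLoopA (PySem.Int.floordiv number 10) (new_number + new_digit * position) (position * 10)
  else
    new_number
termination_by number.toNat
decreasing_by exact pv_floordiv10_toNat_lt number h

def replace_digits (number : Int) : Int := replLoopA number 0 1

-- ===== PORT B =====
def replace_digits_alt (number : Int) : Int :=
  if h : number > 0 then
    replace_digits_alt (PySem.Int.floordiv number 10) * 10
      + PySem.Int.mod (PySem.Int.mod number 10 * 9 + 1) 10
  else
    0
termination_by number.toNat
decreasing_by exact pv_floordiv10_toNat_lt number h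

-- ===== PRECONDITION & SPEC =====
def Spec_replace_digits (number : Int) (out : Int) : Prop := out = replace_digits_alt number
instance (number : Int) (out : Int) : Decidable (Spec_replace_digits number out) := by
  unfold Spec_replace_digits; infer_instance

-- ===== CLAIM =====
def Claim_equal_replace_digits : Prop :=
  ∀ (number : Int), Dom_replace_digits number → Spec_replace_digits number (replace_digits number)

-- ===== LEMMAS AND PROOFS =====
-- Loop invariant: A's loop computes acc + pos * (B's Horner value).
theorem replLoopA_eq (k : Nat) :
    ∀ (n acc pos : Int), n.toNat ≤ k →
      replLoopA n acc pos = acc + pos * replace_digits_alt n := by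
  induction k with
  | zero =>
    intro n acc pos hle
    have hn : ¬ n > 0 := by omega
    rw [replLoopA, replace_digits_alt]
    simp [hn]
  | succ k ih =>
    intro n acc pos hle
    by_cases hn : n > 0
    · have hlt := pv_floordiv10_toNat_lt n hn
      rw [replLoopA, replace_digits_alt]
      simp only [hn, dif_pos]
      rw [ih _ _ _ (by omega)]
      ring
    · rw [replLoopA, replace_digits_alt]
      simp [hn]

-- ===== VERDICT =====
theorem replace_digits_spec : Claim_equal_replace_digits := by
  intro number _
  unfold Spec_replace_digits replace_digits
  rw [replLoopA_eq number.toNat number 0 1 le_rfl]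
  ring
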